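-- pv_equiv track=rewrite | github.com/algoritmiaUS/ada-byron | 2026/regional-andaluza/I/code/real_official.py | gen_all_codes
-- ===== SOURCE A (Python) =====
-- from typing import List, Tuple
--
-- def gen_all_codes(L: int, N: int) -> List[str]:
--     codes = []
--     buf = ['1'] * L
--     def rec(i: int):
--         if i == L:
--             codes.append(''.join(buf))
--             return
--         for d in range(1, N + 1):
--             buf[i] = str(d)
--             rec(i + 1)
--     rec(0)
--     return codes
-- ===== SOURCE B (Python) =====
-- def gen_all_codes(L, N):
--     codes = ['']
--     for _ in range(L):
--         codes = [c + str(d) for c in codes for d in range(1, N + 1)]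
--     return codes
-- ===== Notes on version B (the rewrite author's own statement) =====
-- stated objective: simpler
-- what changed: Replaces the recursive backtracking over a shared mutable buffer with an iterative breadth-first product: the list of partial codes is re-built L times by appending each digit, with no recursion, no buffer and no closure.
-- outside the precondition, e.g. on gen_all_codes(-1, -1): A returns [], B returns ['']
import Mathlib
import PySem

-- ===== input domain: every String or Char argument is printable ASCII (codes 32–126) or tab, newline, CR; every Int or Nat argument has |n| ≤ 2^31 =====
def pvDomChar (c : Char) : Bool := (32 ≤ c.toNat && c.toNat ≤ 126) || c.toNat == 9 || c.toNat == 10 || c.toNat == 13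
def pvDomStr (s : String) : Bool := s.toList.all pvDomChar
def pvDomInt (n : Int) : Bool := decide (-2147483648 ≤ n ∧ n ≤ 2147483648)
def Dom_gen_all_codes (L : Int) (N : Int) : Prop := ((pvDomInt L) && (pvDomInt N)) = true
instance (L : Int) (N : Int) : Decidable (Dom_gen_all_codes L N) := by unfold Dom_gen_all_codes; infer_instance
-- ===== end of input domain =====

-- B replaces A's recursion over a shared mutable buffer by an iterative product rebuild of the code list; objective: simpler.

-- ===== PORT A =====
-- rec(i): the fuel is (L - i).toNat, the pair threads (codes, buf) exactly as the
-- Python closure mutates them; the fuel-0 branch is unreachable for 0 ≤ L (guard only).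
def genRecA (L N : Int) : Nat → Int → List String → List String → List String × List String
  | fuel, i, buf, codes =>
    if i == L then (codes ++ [PySem.Str.join "" buf], buf)
    else match fuel with
      | 0 => (codes, buf)
      | fuel' + 1 =>
        (PySem.List.pyRange 1 (N + 1) 1).foldl
          (fun st d => genRecA L N fuel' (i + 1) (st.2.set i.toNat (PySem.Int.toStr d)) st.1)
          (codes, buf)

def gen_all_codes (L : Int) (N : Int) : List String :=
  (genRecA L N L.toNat 0 (List.replicate L.toNat "1") []).1

-- ===== PORT B =====
def gen_all_codes_alt (L : Int) (N : Int) : List String :=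
  (PySem.List.pyRange 0 L 1).foldl
    (fun codes _ =>
      codes.flatMap (fun c => (PySem.List.pyRange 1 (N + 1) 1).map (fun d => c ++ PySem.Int.toStr d)))
    [""]

-- ===== PRECONDITION & SPEC =====
-- Pre_ excludes only L < 0, where A raises IndexError whenever N ≥ 1 and, for N ≤ 0,
-- its [] is an accident of the never-used empty buffer (a degenerate corner on which
-- either [] or [''] is defensible); B naturally returns [''] there.
def Pre_gen_all_codes (L : Int) (N : Int) : Prop := 0 ≤ L
instance (L : Int) (N : Int) : Decidable (Pre_gen_all_codes L N) := by unfold Pre_gen_all_codes; infer_instance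
def pvWitness_gen_all_codes : Int × Int := (2, 3)

def Spec_gen_all_codes (L : Int) (N : Int) (out : List String) : Prop := out = gen_all_codes_alt L N
instance (L : Int) (N : Int) (out : List String) : Decidable (Spec_gen_all_codes L N out) := by unfold Spec_gen_all_codes; infer_instance

-- ===== CLAIM (what is proved, stated in full; the proofs are below) =====
def Claim_equal_gen_all_codes : Prop := ∀ (L : Int) (N : Int), Dom_gen_all_codes L N → Pre_gen_all_codes L N → Spec_gen_all_codes L N (gen_all_codes L N)

-- ===== LEMMAS AND PROOFS =====

-- all tails of length n over digits 1..N, lexicographic (A's recursion order)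
def pvTails : Nat → Int → List String
  | 0, _ => [""]
  | n + 1, N =>
    (PySem.List.pyRange 1 (N + 1) 1).flatMap
      (fun d => (pvTails n N).map (fun t => PySem.Int.toStr d ++ t))

-- ''.join with empty separator appends: char-list level, then string level
theorem pv_join_append_singleton_chars (l : List (List Char)) (x : List Char) :
    PySem.Chars.join [] (l ++ [x]) = PySem.Chars.join [] l ++ x := by
  induction l with
  | nil => simp [PySem.Chars.join_nil, PySem.Chars.join_singleton]
  | cons a l ih =>
    cases l with
    | nil => simp [PySem.Chars.join_singleton, PySem.Chars.join_cons_cons]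
    | cons b l' =>
      rw [List.cons_append, PySem.Chars.join_cons_cons, List.cons_append] at *
      rw [PySem.Chars.join_cons_cons, ih]
      simp [List.append_assoc]

theorem pv_sjoin_append_singleton (l : List String) (x : String) :
    PySem.Str.join "" (l ++ [x]) = PySem.Str.join "" l ++ x := by
  rw [← String.toList_inj]
  simp [PySem.Str.toList_join, pv_join_append_singleton_chars]

theorem pv_sjoin_nil : PySem.Str.join "" ([] : List String) = "" := by
  rw [← String.toList_inj]
  simp [PySem.Str.toList_join, PySem.Chars.join_nil]

theorem pv_set_append_cons (pre : List String) (x v : String) (post : List String) :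
    (pre ++ x :: post).set pre.length v = pre ++ v :: post := by
  induction pre with
  | nil => simp
  | cons a pre ih => simp [ih]

-- B's right-append step applied to pvTails n yields pvTails (n+1)
theorem pv_step_tails (N : Int) (n : Nat) :
    (pvTails n N).flatMap
      (fun c => (PySem.List.pyRange 1 (N + 1) 1).map (fun d => c ++ PySem.Int.toStr d))
    = pvTails (n + 1) N := by
  induction n with
  | zero =>
    simp only [pvTails, List.flatMap_cons, List.flatMap_nil, List.map_cons, List.map_nil,
      List.append_nil, String.empty_append, String.append_empty]
    generalize PySem.List.pyRange 1 (N + 1) 1 = l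
    induction l with
    | nil => simp
    | cons a l ih => simp [List.flatMap_cons, ih]
  | succ n ih =>
    conv_lhs => rw [pvTails, List.flatMap_assoc]
    rw [pvTails]
    congr 1
    funext d
    rw [List.flatMap_map, ← ih, List.map_flatMap]
    congr 1
    funext t
    simp [List.map_map, Function.comp, String.append_assoc]

-- B computes pvTails L.toNat
theorem pv_alt_foldB (N : Int) (l : List Int) : ∀ (k : Nat),
    l.foldl
      (fun codes _ =>
        codes.flatMap (fun c => (PySem.List.pyRange 1 (N + 1) 1).map (fun d => c ++ PySem.Int.toStr d)))
      (pvTails k N)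
    = pvTails (k + l.length) N := by
  induction l with
  | nil => intro k; simp
  | cons a l ih =>
    intro k
    rw [List.foldl_cons, pv_step_tails, ih (k + 1)]
    congr 1
    simp [List.length_cons]
    omega

theorem pv_alt_eq_tails (L N : Int) (hL : 0 ≤ L) :
    gen_all_codes_alt L N = pvTails L.toNat N := by
  unfold gen_all_codes_alt
  have h0 : pvTails 0 N = [""] := rfl
  rw [← h0, pv_alt_foldB N _ 0, PySem.List.length_pyRange_one]
  congr 1
  omega

-- the inner foldl over the digit list
theorem pv_recA_inner (L N : Int) (f : Nat)
    (ihf : ∀ (i : Int) (pre post codes : List String),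
      post.length = f → pre.length = i.toNat → 0 ≤ i → i + f = L →
      ∃ post', post'.length = f ∧
        genRecA L N f i (pre ++ post) codes =
          (codes ++ (pvTails f N).map (fun t => PySem.Str.join "" pre ++ t), pre ++ post')) :
    ∀ (ds : List Int) (i : Int) (pre : List String) (x : String) (post codes : List String),
      post.length = f → pre.length = i.toNat → 0 ≤ i → i + 1 + f = L →
      ∃ x' post', post'.length = f ∧
        ds.foldl
          (fun st d => genRecA L N f (i + 1) (st.2.set i.toNat (PySem.Int.toStr d)) st.1)
          (codes, pre ++ x :: post)
        = (codes ++ ds.flatMap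
              (fun d => (pvTails f N).map (fun t => PySem.Str.join "" pre ++ (PySem.Int.toStr d ++ t))),
           pre ++ x' :: post') := by
  intro ds
  induction ds with
  | nil =>
    intro i pre x post codes hpost hpre hi hiL
    exact ⟨x, post, hpost, by simp⟩
  | cons d ds ihd =>
    intro i pre x post codes hpost hpre hi hiL
    rw [List.foldl_cons]
    have hset : (pre ++ x :: post).set i.toNat (PySem.Int.toStr d) =
        (pre ++ [PySem.Int.toStr d]) ++ post := by
      rw [← hpre, pv_set_append_cons]
      simp
    have hlen1 : (pre ++ [PySem.Int.toStr d]).length = (i + 1).toNat := by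
      simp [hpre]; omega
    obtain ⟨post₂, hlen₂, heq⟩ :=
      ihf (i + 1) (pre ++ [PySem.Int.toStr d]) post codes hpost hlen1 (by omega) (by omega)
    simp only [hset]
    rw [heq]
    obtain ⟨x', post', hl, heq2⟩ :=
      ihd i pre (PySem.Int.toStr d) post₂
        (codes ++ (pvTails f N).map (fun t => PySem.Str.join "" (pre ++ [PySem.Int.toStr d]) ++ t))
        hlen₂ hpre hi hiL
    simp only [List.append_assoc, List.singleton_append] at heq2 ⊢
    rw [heq2]
    refine ⟨x', post', hl, ?_⟩
    simp [pv_sjoin_append_singleton, List.flatMap_cons, String.append_assoc]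

-- A's recursion: the main invariant
theorem pv_recA_spec (L N : Int) : ∀ (fuel : Nat) (i : Int) (pre post codes : List String),
    post.length = fuel → pre.length = i.toNat → 0 ≤ i → i + fuel = L →
    ∃ post', post'.length = fuel ∧
      genRecA L N fuel i (pre ++ post) codes =
        (codes ++ (pvTails fuel N).map (fun t => PySem.Str.join "" pre ++ t), pre ++ post') := by
  intro fuel
  induction fuel with
  | zero =>
    intro i pre post codes hpost hpre hi hiL
    refine ⟨post, hpost, ?_⟩
    have hiL' : i = L := by omega
    rw [genRecA]
    simp [hiL', pvTails, List.length_eq_zero_iff.mp hpost]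
  | succ f ihf =>
    intro i pre post codes hpost hpre hi hiL
    have hne : (i == L) = false := by simp; omega
    obtain ⟨x, post₀, rfl⟩ : ∃ y ys, post = y :: ys := by
      cases post with
      | nil => simp at hpost
      | cons y ys => exact ⟨y, ys, rfl⟩
    have hpost₀ : post₀.length = f := by simpa using hpost
    obtain ⟨x', post', hl, heq⟩ :=
      pv_recA_inner L N f (fun i pre post codes h1 h2 h3 h4 => ihf i pre post codes h1 h2 h3 h4)
        (PySem.List.pyRange 1 (N + 1) 1) i pre x post₀ codes hpost₀ hpre hi (by omega)
    refine ⟨x' :: post', by simp [hl], ?_⟩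
    rw [genRecA]
    simp only [hne, Bool.false_eq_true, if_false]
    rw [heq]
    simp [pvTails, List.map_flatMap, List.map_map, Function.comp_def]

-- ===== VERDICT (by name: the statement is the Claim_ definition above) =====
theorem gen_all_codes_spec : Claim_equal_gen_all_codes := by
  intro L N _ hL
  have hL' : (0:Int) ≤ L := hL
  unfold Spec_gen_all_codes
  unfold gen_all_codes
  obtain ⟨post', _, heq⟩ :=
    pv_recA_spec L N L.toNat 0 [] (List.replicate L.toNat "1") []
      (by simp) (by simp) le_rfl (by omega)
  simp only [List.nil_append] at heq
  rw [heq, pv_alt_eq_tails L N hL']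
  simp [pv_sjoin_nil]
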